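-- pv_equiv track=rewrite | github.com/Rawannada/graduation_infra | ai_node/api_server.py | _split_page_ranges
-- ===== SOURCE A (Python) =====
-- from typing import Dict, List
--
-- def _split_page_ranges(total_pages: int, num_nodes: int) -> List[tuple]:
--     chunk_size = total_pages // num_nodes
--     ranges, start = [], 0
--     for i in range(num_nodes):
--         end = start + chunk_size if i < num_nodes - 1 else total_pages
--         ranges.append((start, end))
--         start = end
--     return ranges
-- ===== SOURCE B (Python) =====
-- def _split_page_ranges(total_pages: int, num_nodes: int):
--     chunk_size = total_pages // num_nodes  # divide first: num_nodes == 0 still raises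
--     # Stage 1: build the list of cut points (node starts plus the final end).
--     cuts = [i * chunk_size for i in range(num_nodes)] + [total_pages]
--     # Stage 2: pair each cut with the next one.
--     return list(zip(cuts, cuts[1:]))
-- ===== Notes on version B (the rewrite author's own statement) =====
-- stated objective: alternative
-- what changed: Two-stage construction: first build the list of n+1 boundary cut points (i*chunk_size plus the final total_pages), then pair adjacent cuts with zip, instead of A's single pass threading a running start accumulator.
import Mathlib
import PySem

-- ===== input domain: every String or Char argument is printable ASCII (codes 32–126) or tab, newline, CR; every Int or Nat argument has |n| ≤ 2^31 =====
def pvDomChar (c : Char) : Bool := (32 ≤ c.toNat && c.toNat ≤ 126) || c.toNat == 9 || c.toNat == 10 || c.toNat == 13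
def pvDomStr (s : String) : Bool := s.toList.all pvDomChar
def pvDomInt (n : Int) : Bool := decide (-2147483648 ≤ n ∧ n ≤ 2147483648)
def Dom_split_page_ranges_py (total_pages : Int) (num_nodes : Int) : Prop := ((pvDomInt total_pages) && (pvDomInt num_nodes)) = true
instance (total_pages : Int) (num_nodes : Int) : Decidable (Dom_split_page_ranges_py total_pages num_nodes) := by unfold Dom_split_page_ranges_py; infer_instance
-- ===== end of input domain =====

-- B builds the list of n+1 boundary cut points in one pass and then pairs adjacent cuts
-- with zip, instead of A's single pass threading a running `start` accumulator (objective: alternative).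


-- ===== PORT A =====
def split_page_ranges_py (total_pages : Int) (num_nodes : Int) : List (Int × Int) :=
  let chunk_size := PySem.Int.floordiv total_pages num_nodes
  let st := (PySem.List.pyRange 0 num_nodes 1).foldl
    (fun (st : List (Int × Int) × Int) i =>
      let endv := if i < num_nodes - 1 then st.2 + chunk_size else total_pages
      (st.1 ++ [(st.2, endv)], endv))
    ([], 0)
  st.1

-- ===== PORT B =====
def split_page_ranges_py_alt (total_pages : Int) (num_nodes : Int) : List (Int × Int) :=
  let chunk_size := PySem.Int.floordiv total_pages num_nodes
  let cuts := (PySem.List.pyRange 0 num_nodes 1).map (fun i => i * chunk_size) ++ [total_pages]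
  List.zip cuts (cuts.drop 1)

-- ===== PRECONDITION & SPEC =====
-- num_nodes == 0 makes A's division raise ZeroDivisionError (B raises there too).
def Pre_split_page_ranges_py (total_pages : Int) (num_nodes : Int) : Prop := num_nodes ≠ 0
instance (total_pages : Int) (num_nodes : Int) : Decidable (Pre_split_page_ranges_py total_pages num_nodes) := by unfold Pre_split_page_ranges_py; infer_instance
def pvWitness_split_page_ranges_py : Int × Int := (10, 3)

def Spec_split_page_ranges_py (total_pages : Int) (num_nodes : Int) (out : List (Int × Int)) : Prop := out = split_page_ranges_py_alt total_pages num_nodes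
instance (total_pages : Int) (num_nodes : Int) (out : List (Int × Int)) : Decidable (Spec_split_page_ranges_py total_pages num_nodes out) := by unfold Spec_split_page_ranges_py; infer_instance

-- ===== CLAIM (what is proved, stated in full; the proofs are below) =====
def Claim_equal_split_page_ranges_py : Prop := ∀ (total_pages : Int) (num_nodes : Int), Dom_split_page_ranges_py total_pages num_nodes → Pre_split_page_ranges_py total_pages num_nodes → Spec_split_page_ranges_py total_pages num_nodes (split_page_ranges_py total_pages num_nodes)

-- ===== LEMMAS AND PROOFS =====

-- Loop invariant for A: after folding over range(m) with m ≤ n-1, the accumulated list is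
-- the closed-form list over that prefix and the running start equals m*chunk.
theorem spr_loop_inv (t n c : Int) (m : Nat) (hm : (m : Int) ≤ n - 1) :
    (PySem.List.pyRange 0 (m : Int) 1).foldl
      (fun (st : List (Int × Int) × Int) i =>
        let endv := if i < n - 1 then st.2 + c else t
        (st.1 ++ [(st.2, endv)], endv))
      ([], 0)
    = ((PySem.List.pyRange 0 (m : Int) 1).map
        (fun i => (i * c, if i < n - 1 then (i + 1) * c else t)), (m : Int) * c) := by
  induction m with
  | zero => simp [PySem.List.pyRange_one_eq_nil]
  | succ k ih =>
    have hk : (k : Int) ≤ n - 1 := by push_cast at hm ⊢; omega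
    have hklt : (k : Int) < n - 1 := by push_cast at hm; omega
    have hsplit : PySem.List.pyRange 0 ((k : Int) + 1) 1
        = PySem.List.pyRange 0 (k : Int) 1 ++ [(k : Int)] := by
      simpa using PySem.List.pyRange_one_succ_right (a := 0) (b := (k : Int)) (by positivity)
    push_cast
    rw [hsplit, List.foldl_append, ih hk, List.map_append]
    simp only [List.foldl_cons, List.foldl_nil, List.map_cons, List.map_nil]
    rw [if_pos hklt, if_pos hklt]
    ring_nf

-- A's closed-form list equals B's zip of adjacent cut points (for n > 0), by extensionality.
theorem spr_map_eq_zip (t n c : Int) (hn : 0 < n) :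
    (PySem.List.pyRange 0 n 1).map
        (fun i => (i * c, if i < n - 1 then (i + 1) * c else t))
    = (let cuts := (PySem.List.pyRange 0 n 1).map (fun i => i * c) ++ [t]
       List.zip cuts (cuts.drop 1)) := by
  have hrlen : (PySem.List.pyRange 0 n 1).length = n.toNat := by
    simp [PySem.List.length_pyRange_one]
  have hget : ∀ (k : Nat)
      (h : k < ((PySem.List.pyRange 0 n 1).map (fun i => i * c) ++ [t]).length),
      ((PySem.List.pyRange 0 n 1).map (fun i => i * c) ++ [t])[k]
        = if (k : Int) < n then (k : Int) * c else t := by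
    intro k h
    have hk : k < n.toNat + 1 := by simpa [hrlen] using h
    by_cases hkn : k < n.toNat
    · rw [List.getElem_append_left (by simpa [hrlen] using hkn)]
      rw [List.getElem_map, PySem.List.getElem_pyRange_one]
      rw [if_pos (by omega)]
      ring_nf
    · have hke : k = n.toNat := by omega
      subst hke
      rw [List.getElem_append_right (by simp [hrlen])]
      rw [if_neg (by omega)]
      simp [hrlen]
  apply List.ext_getElem
  · simp [List.length_zip, hrlen]
  · intro k h1 h2
    have hk : k < n.toNat := by simpa [hrlen] using h1
    rw [List.getElem_map, PySem.List.getElem_pyRange_one]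
    rw [List.getElem_zip]
    have hd : ∀ (h : k < ((((PySem.List.pyRange 0 n 1).map (fun i => i * c) ++ [t])).drop 1).length),
        (((PySem.List.pyRange 0 n 1).map (fun i => i * c) ++ [t]).drop 1)[k]
          = ((PySem.List.pyRange 0 n 1).map (fun i => i * c) ++ [t])[k + 1]'(by
              simp at h; simp; omega) := by
      intro h
      simp
    rw [hd, hget, hget]
    rw [if_pos (show ((k : Nat) : Int) < n by omega)]
    by_cases hlast : (k : Int) + 1 < n
    · rw [if_pos (show 0 + (k : Int) < n - 1 by omega),
         if_pos (show (((k + 1 : Nat)) : Int) < n by push_cast; omega)]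
      simp only [Prod.mk.injEq]
      constructor <;> (push_cast; ring)
    · rw [if_neg (show ¬(0 + (k : Int) < n - 1) by omega),
         if_neg (show ¬((((k + 1 : Nat)) : Int) < n) by push_cast; omega)]
      simp only [zero_add]

-- ===== VERDICT (by name: the statement is the Claim_ definition above) =====
theorem split_page_ranges_py_spec : Claim_equal_split_page_ranges_py := by
  intro t n _ hpre
  unfold Spec_split_page_ranges_py split_page_ranges_py split_page_ranges_py_alt
  by_cases hn : n ≤ 0
  · simp [PySem.List.pyRange_one_eq_nil hn]
  · rw [not_le] at hn
    set c := PySem.Int.floordiv t n with hc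
    have h1 : (0 : Int) ≤ n - 1 := by omega
    have hm : ((n - 1).toNat : Int) = n - 1 := Int.toNat_of_nonneg h1
    have hsplit : PySem.List.pyRange 0 n 1
        = PySem.List.pyRange 0 (n - 1) 1 ++ [n - 1] := by
      have := PySem.List.pyRange_one_succ_right (a := 0) (b := n - 1) h1
      simpa using this
    have hinv := spr_loop_inv t n c ((n - 1).toNat) (by rw [hm])
    rw [hm] at hinv
    have hmap : ((PySem.List.pyRange 0 n 1).foldl
        (fun (st : List (Int × Int) × Int) i =>
          let endv := if i < n - 1 then st.2 + c else t
          (st.1 ++ [(st.2, endv)], endv))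
        ([], 0)).1
        = (PySem.List.pyRange 0 n 1).map
            (fun i => (i * c, if i < n - 1 then (i + 1) * c else t)) := by
      rw [hsplit]
      simp only [List.foldl_append, List.map_append, hinv]
      simp only [List.foldl_cons, List.foldl_nil, List.map_cons, List.map_nil]
      rw [if_neg (by omega), if_neg (by omega)]
    exact hmap.trans (spr_map_eq_zip t n c hn)
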